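-- pv_equiv track=rewrite | github.com/rtmaww/EntLM | metric.py | filter_item
-- ===== SOURCE A (Python) =====
-- def filter_item(item_list, subword_mask, input_mask):
--     # 只保留每个词第一个subword和非[PAD][CLS][SEP]部分
--     clean_item_list = []
--     for item, not_subword, not_mask in zip(item_list, subword_mask, input_mask):
--         if not_subword==0:
--             continue
--         if not_mask==0:
--             break
--         clean_item_list.append(item)
--     return clean_item_list
-- ===== SOURCE B (Python) =====
-- def filter_item(item_list, subword_mask, input_mask):
--     # Two-phase: find truncation point, then filter the prefix.
--     n = min(len(item_list), len(subword_mask), len(input_mask))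
--     stop = next((i for i in range(n) if subword_mask[i] != 0 and input_mask[i] == 0), n)
--     return [item_list[i] for i in range(stop) if subword_mask[i] != 0]
-- ===== Notes on version B (the rewrite author's own statement) =====
-- stated objective: alternative
-- what changed: Replaces the fused skip/break/append loop with two separate passes: first find the truncation index (first position with subword!=0 and mask==0), then a comprehension filtering the prefix before it.
import Mathlib
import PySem

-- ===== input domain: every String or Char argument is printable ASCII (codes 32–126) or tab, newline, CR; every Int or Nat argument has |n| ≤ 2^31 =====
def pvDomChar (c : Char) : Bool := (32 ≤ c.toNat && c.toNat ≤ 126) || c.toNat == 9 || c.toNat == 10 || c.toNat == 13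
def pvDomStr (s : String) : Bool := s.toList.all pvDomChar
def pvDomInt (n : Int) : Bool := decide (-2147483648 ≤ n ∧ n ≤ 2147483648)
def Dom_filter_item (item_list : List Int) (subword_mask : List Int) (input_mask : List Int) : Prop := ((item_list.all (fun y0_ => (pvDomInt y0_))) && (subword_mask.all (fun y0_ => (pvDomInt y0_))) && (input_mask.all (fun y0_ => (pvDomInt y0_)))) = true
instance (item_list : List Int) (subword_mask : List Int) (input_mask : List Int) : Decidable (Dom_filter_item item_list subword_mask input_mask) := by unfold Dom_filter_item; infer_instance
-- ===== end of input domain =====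

-- ===== PORT A =====
-- Literal port of A: fused loop over zip with continue/skip and break.
def filter_item : List Int → List Int → List Int → List Int
  | item :: is, s :: ss, m :: ms =>
    if s = 0 then filter_item is ss ms
    else if m = 0 then []
    else item :: filter_item is ss ms
  | _, _, _ => []

-- ===== PORT B =====
-- Port of B: find the truncation index `stop`, then filter the prefix before it.
def filter_item_alt (item_list : List Int) (subword_mask : List Int) (input_mask : List Int) : List Int :=
  let n := min item_list.length (min subword_mask.length input_mask.length)
  let stop := (((List.range n).find? (fun i =>
      subword_mask.getD i 0 ≠ 0 && input_mask.getD i 0 = 0)).getD n)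
  ((List.range stop).filter (fun i => subword_mask.getD i 0 ≠ 0)).map
    (fun i => item_list.getD i 0)

-- ===== PRECONDITION & SPEC =====
def Spec_filter_item (item_list : List Int) (subword_mask : List Int) (input_mask : List Int) (out : List Int) : Prop := out = filter_item_alt item_list subword_mask input_mask
instance (item_list : List Int) (subword_mask : List Int) (input_mask : List Int) (out : List Int) : Decidable (Spec_filter_item item_list subword_mask input_mask out) := by unfold Spec_filter_item; infer_instance

-- ===== CLAIM (what is proved, stated in full; the proofs are below) =====
def Claim_equal_filter_item : Prop := ∀ (item_list : List Int) (subword_mask : List Int) (input_mask : List Int), Dom_filter_item item_list subword_mask input_mask → Spec_filter_item item_list subword_mask input_mask (filter_item item_list subword_mask input_mask)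

-- ===== LEMMAS AND PROOFS =====

lemma alt_cons (i s m : Int) (is ss ms : List Int) :
    filter_item_alt (i :: is) (s :: ss) (m :: ms) =
      if s ≠ 0 ∧ m = 0 then []
      else (if s ≠ 0 then [i] else []) ++ filter_item_alt is ss ms := by
  unfold filter_item_alt
  simp only [List.length_cons]
  rw [show min (is.length + 1) (min (ss.length + 1) (ms.length + 1))
        = min is.length (min ss.length ms.length) + 1 by omega]
  rw [List.range_succ_eq_map, List.find?_cons]
  by_cases h0 : s ≠ 0 ∧ m = 0
  · simp [h0.1, h0.2]
  · have hpred : ((s :: ss).getD 0 0 ≠ 0 && decide ((m :: ms).getD 0 0 = 0)) = false := by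
      simp only [List.getD_cons_zero]
      by_cases hs : s = 0 <;> simp_all
    rw [hpred]
    simp only [List.find?_map]
    have hshift : ∀ j : Nat,
        ((fun i => (s :: ss).getD i 0 ≠ 0 && decide ((m :: ms).getD i 0 = 0)) ∘ Nat.succ) j
        = (fun i => ss.getD i 0 ≠ 0 && decide (ms.getD i 0 = 0)) j := by
      intro j; simp [Function.comp]
    rw [funext hshift]
    set n' := min is.length (min ss.length ms.length) with hn'
    have hfin : ∀ k : Nat,
        ((List.range k).filter ((fun j => decide ((s :: ss).getD j 0 ≠ 0)) ∘ Nat.succ)).map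
            ((fun j => (i :: is).getD j 0) ∘ Nat.succ)
          = ((List.range k).filter (fun j => decide (ss.getD j 0 ≠ 0))).map
            (fun j => is.getD j 0) := by
      intro k
      have e1 : ((fun j => decide ((s :: ss).getD j 0 ≠ 0)) ∘ Nat.succ)
          = (fun j => decide (ss.getD j 0 ≠ 0)) := by funext j; simp
      have e2 : ((fun j => (i :: is).getD j 0) ∘ Nat.succ) = (fun j => is.getD j 0) := by
        funext j; simp
      rw [e1, e2]
    cases hf : (List.range n').find? (fun i => ss.getD i 0 ≠ 0 && decide (ms.getD i 0 = 0)) with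
    | none =>
        simp only [Option.map_none, Option.getD_none]
        rw [List.range_succ_eq_map, List.filter_cons]
        by_cases hs : s = 0
        · have hc : (decide ((s :: ss).getD 0 0 ≠ 0)) = false := by simp [hs]
          rw [hc, if_neg Bool.false_ne_true, List.filter_map, List.map_map, hfin n']
          simp [hs]
        · have hm : m ≠ 0 := fun h => h0 ⟨hs, h⟩
          have hc : (decide ((s :: ss).getD 0 0 ≠ 0)) = true := by simp [hs]
          rw [hc, if_pos rfl]
          simp only [List.map_cons]
          rw [List.filter_map, List.map_map, hfin n']
          simp [hs, hm]
    | some k =>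
        simp only [Option.map_some, Option.getD_some, Nat.succ_eq_add_one]
        rw [List.range_succ_eq_map, List.filter_cons]
        by_cases hs : s = 0
        · have hc : (decide ((s :: ss).getD 0 0 ≠ 0)) = false := by simp [hs]
          rw [hc, if_neg Bool.false_ne_true, List.filter_map, List.map_map, hfin k]
          simp [hs]
        · have hm : m ≠ 0 := fun h => h0 ⟨hs, h⟩
          have hc : (decide ((s :: ss).getD 0 0 ≠ 0)) = true := by simp [hs]
          rw [hc, if_pos rfl]
          simp only [List.map_cons]
          rw [List.filter_map, List.map_map, hfin k]
          simp [hs, hm]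

-- ===== VERDICT (by name: the statement is the Claim_ definition above) =====
theorem filter_item_spec : Claim_equal_filter_item := by
  intro il sl ml hd
  unfold Spec_filter_item
  induction il generalizing sl ml with
  | nil => cases sl <;> cases ml <;> simp [filter_item, filter_item_alt]
  | cons i is ih =>
    cases sl with
    | nil => simp [filter_item, filter_item_alt]
    | cons s ss =>
      cases ml with
      | nil => simp [filter_item, filter_item_alt]
      | cons m ms =>
        have hd' : Dom_filter_item is ss ms := by
          revert hd; simp [Dom_filter_item]; tauto
        rw [alt_cons]
        by_cases hs : s = 0
        · simp [filter_item, hs, ih ss ms hd']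
        · by_cases hm : m = 0
          · simp [filter_item, hs, hm]
          · simp [filter_item, hs, hm, ih ss ms hd']
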